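-- pv_equiv track=rewrite | github.com/vivekananda05/medical-vlm | data_preprocessing.py | rem_punctuations
-- ===== SOURCE A (Python) =====
-- def rem_punctuations(text):
--     punctuations = '''!()-[]{};:'"\,<>/?@#$%^&*~'''
--     new_text = []
--     for line in text:
--         for char in line:
--             if char in punctuations:
--                 line = line.replace(char, "")
--         new_text.append(" ".join(e for e in line.split()))
--     return new_text
-- ===== SOURCE B (Python) =====
-- def rem_punctuations(text):
--     punctuations = '''!()-[]{};:'"\,<>/?@#$%^&*~'''
--     result = []
--     for line in text:
--         kept = []
--         for word in line.split():
--             stripped = "".join(ch for ch in word if ch not in punctuations)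
--             if stripped:
--                 kept.append(stripped)
--         result.append(" ".join(kept))
--     return result
-- ===== Notes on version B (the rewrite author's own statement) =====
-- stated objective: alternative
-- what changed: B splits each line into words first and strips punctuation with a single character-filter pass per word (dropping words that become empty), instead of A's repeated full-string str.replace calls followed by split/join.
import Mathlib
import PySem

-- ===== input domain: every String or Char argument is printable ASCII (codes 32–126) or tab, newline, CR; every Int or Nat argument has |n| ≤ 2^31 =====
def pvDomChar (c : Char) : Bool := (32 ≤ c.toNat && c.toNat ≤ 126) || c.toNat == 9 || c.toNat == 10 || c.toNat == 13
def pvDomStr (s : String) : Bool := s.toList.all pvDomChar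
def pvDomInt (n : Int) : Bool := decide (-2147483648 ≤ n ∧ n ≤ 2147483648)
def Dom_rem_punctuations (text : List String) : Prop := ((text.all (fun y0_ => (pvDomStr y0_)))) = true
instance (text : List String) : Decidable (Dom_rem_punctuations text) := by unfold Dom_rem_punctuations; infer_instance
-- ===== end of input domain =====

-- B strips punctuation per word after splitting, instead of A's repeated full-string replace before split; same return value.

-- ===== PORT A =====
-- A: for each line, iterate over the original line's characters, replacing every
-- punctuation character found by "" in the current string, then " ".join(line.split()).
def rem_punctuations (text : List String) : List String :=
  let punctuations : List Char := "!()-[]{};:'\"\\,<>/?@#$%^&*~".toList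
  text.foldl (fun new_text line =>
    let l := line.toList.foldl (fun s c =>
      if PySem.Chars.isIn [c] punctuations then PySem.Chars.replace s [c] [] else s) line.toList
    new_text ++ [String.mk (PySem.Chars.join [' '] (PySem.Chars.split₀ l))]) []

-- ===== PORT B =====
-- B: split the line into words, keep only non-punctuation characters of each word,
-- drop words that became empty, join with a single space.
def rem_punctuations_alt (text : List String) : List String :=
  let punctuations : List Char := "!()-[]{};:'\"\\,<>/?@#$%^&*~".toList
  text.map (fun line =>
    let kept := (PySem.Chars.split₀ line.toList).foldl (fun ws w =>
      let stripped := w.filter (fun ch => !PySem.Chars.isIn [ch] punctuations)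
      if stripped.isEmpty then ws else ws ++ [stripped]) []
    String.mk (PySem.Chars.join [' '] kept))

-- ===== PRECONDITION & SPEC =====
def Spec_rem_punctuations (text : List String) (out : List String) : Prop := out = rem_punctuations_alt text
instance (text : List String) (out : List String) : Decidable (Spec_rem_punctuations text out) := by unfold Spec_rem_punctuations; infer_instance

-- ===== CLAIM (what is proved, stated in full; the proofs are below) =====
def Claim_equal_rem_punctuations : Prop := ∀ (text : List String), Dom_rem_punctuations text → Spec_rem_punctuations text (rem_punctuations text)

-- ===== LEMMAS AND PROOFS =====

-- reference "words with pending current word" function mirroring split₀.go without the accumulator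
def pvW (rest : List Char) (cur : List Char) : List (List Char) :=
  match rest with
  | [] => if cur.isEmpty then [] else [cur.reverse]
  | c :: rest' =>
    if PySem.Chars.isspace c then
      if cur.isEmpty then pvW rest' [] else cur.reverse :: pvW rest' []
    else pvW rest' (c :: cur)

theorem split_go_eq (rest : List Char) : ∀ cur acc,
    PySem.Chars.split₀.go rest cur acc = acc.reverse ++ pvW rest cur := by
  induction rest with
  | nil => intro cur acc; by_cases h : cur.isEmpty <;>
      simp [PySem.Chars.split₀.go, pvW, h]
  | cons c rest' ih =>
    intro cur acc
    by_cases hs : PySem.Chars.isspace c <;> by_cases hc : cur.isEmpty <;>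
      simp [PySem.Chars.split₀.go, pvW, hs, hc, ih]

theorem split₀_eq_pvW (cs : List Char) : PySem.Chars.split₀ cs = pvW cs [] := by
  simp [PySem.Chars.split₀, split_go_eq]

-- replace of a single character by "" is exactly a filter
theorem replace_go_single (c : Char) : ∀ (fuel : Nat) (l acc : List Char), l.length ≤ fuel →
    PySem.Chars.replace.go [c] [] fuel l acc = acc.reverse ++ l.filter (· ≠ c) := by
  intro fuel
  induction fuel with
  | zero =>
    intro l acc h
    have : l = [] := List.eq_nil_of_length_eq_zero (Nat.le_zero.mp h)
    subst this; simp [PySem.Chars.replace.go]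
  | succ n ih =>
    intro l acc h
    match l with
    | [] => simp [PySem.Chars.replace.go]
    | x :: t =>
      by_cases hx : x = c
      · subst hx
        simp only [PySem.Chars.replace.go, List.isPrefixOf, BEq.rfl, Bool.true_and,
          List.isPrefixOf_nil_left, if_true, List.length_cons, List.length_nil,
          List.drop_succ_cons, List.drop_zero, List.reverse_nil, List.nil_append]
        rw [ih t acc (by simpa using Nat.succ_le_succ_iff.mp h)]
        simp
      · have hpre : List.isPrefixOf [c] (x :: t) = false := by
          simp [List.isPrefixOf]; exact fun hh => absurd hh.symm hx
        simp only [PySem.Chars.replace.go, hpre, Bool.false_eq_true, if_false]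
        rw [ih t (x :: acc) (by simpa using Nat.succ_le_succ_iff.mp h)]
        simp [hx]

theorem replace_single_eq_filter (s : List Char) (c : Char) :
    PySem.Chars.replace s [c] [] = s.filter (· ≠ c) := by
  simp [PySem.Chars.replace, replace_go_single c s.length s [] (le_refl _)]

-- the char-by-char replace loop is a filter of the punctuation characters present
theorem foldl_replace_filter (p : Char → Bool) (l : List Char) : ∀ (init : List Char),
    l.foldl (fun s c => if p c then s.filter (· ≠ c) else s) init
      = init.filter (fun x => !(p x && l.contains x)) := by
  induction l with
  | nil => intro init; simp
  | cons c l' ih =>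
    intro init
    by_cases hp : p c
    · simp only [List.foldl_cons, hp, if_true, ih, List.filter_filter]
      apply List.filter_congr
      intro x _
      by_cases hxc : x = c
      · subst hxc; simp [hp]
      · simp [hxc]
    · simp only [List.foldl_cons, hp, Bool.false_eq_true, if_false, ih]
      apply List.filter_congr
      intro x _
      by_cases hxc : x = c
      · subst hxc; simp [hp]
      · simp [hxc]

-- splitting after a whitespace-preserving filter = filtering each word, dropping the empties
theorem pvW_filter (q : Char → Bool) (rest : List Char)
    (hq : ∀ c ∈ rest, PySem.Chars.isspace c = true → q c = true) : ∀ cur,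
    pvW (rest.filter q) (cur.filter q)
      = ((pvW rest cur).map (List.filter q)).filter (fun w => !w.isEmpty) := by
  induction rest with
  | nil =>
    intro cur
    by_cases h : (cur.filter q).isEmpty
    · have hcur : cur.filter q = [] := List.isEmpty_iff.mp h
      by_cases h2 : cur.isEmpty
      · simp [pvW, h, h2]
      · simp [pvW, h, h2, List.filter_reverse, hcur]
    · have h2 : cur.isEmpty = false := by
        cases hc : cur.isEmpty
        · rfl
        · exact absurd (by simp [List.isEmpty_iff.mp hc]) h
      simp only [pvW, List.filter_nil, h, Bool.false_eq_true, if_false, h2,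
        List.map_cons, List.map_nil, List.filter_cons, List.filter_reverse]
      simp [List.isEmpty_iff] at h ⊢
      exact h
  | cons c rest' ih =>
    intro cur
    have hq' : ∀ c ∈ rest', PySem.Chars.isspace c = true → q c = true :=
      fun x hx => hq x (List.mem_cons_of_mem _ hx)
    have ihnil := ih hq' []
    simp only [List.filter_nil] at ihnil
    by_cases hqc : q c
    · by_cases hs : PySem.Chars.isspace c
      · by_cases hc : cur.isEmpty
        · have hcur : cur = [] := List.isEmpty_iff.mp hc
          subst hcur
          simp only [List.filter_cons, hqc, pvW, hs, if_true, List.filter_nil,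
            List.isEmpty_nil]
          exact ihnil
        · by_cases hfc : (cur.filter q).isEmpty
          · have hcur : cur.filter q = [] := List.isEmpty_iff.mp hfc
            simp only [List.filter_cons, hqc, pvW, hs, if_true, hc, hfc,
              Bool.false_eq_true, if_false, List.map_cons, List.filter_cons,
              List.filter_reverse, hcur, List.reverse_nil, List.isEmpty_nil]
            exact ihnil
          · simp only [List.filter_cons, hqc, pvW, hs, if_true, hc, hfc,
              Bool.false_eq_true, if_false, List.map_cons, List.filter_cons,
              List.filter_reverse]
            have hfc' : (cur.filter q).isEmpty = false := Bool.eq_false_iff.mpr hfc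
            have : ((cur.filter q).reverse).isEmpty = false := by simpa using hfc'
            rw [ihnil]
            simp [this]
      · have hf1 : List.filter q (c :: rest') = c :: List.filter q rest' := by simp [hqc]
        have hf2 : List.filter q (c :: cur) = c :: List.filter q cur := by simp [hqc]
        have h3 := ih hq' (c :: cur)
        rw [hf2] at h3
        rw [hf1]
        simp [pvW, hs, h3]
    · have hs : PySem.Chars.isspace c = false := by
        cases h : PySem.Chars.isspace c
        · rfl
        · exact absurd (hq c (List.mem_cons_self) h) (by simp [hqc])
      have hf1 : List.filter q (c :: rest') = List.filter q rest' := by simp [hqc]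
      have hf2 : List.filter q (c :: cur) = List.filter q cur := by simp [hqc]
      have h3 := ih hq' (c :: cur)
      rw [hf2] at h3
      rw [hf1, h3]
      simp [pvW, hs]

-- on the domain, whitespace characters are never punctuation
theorem dom_space_not_punct (c : Char) (hd : pvDomChar c = true)
    (hs : PySem.Chars.isspace c = true) :
    PySem.Chars.isIn [c] ("!()-[]{};:'\"\\,<>/?@#$%^&*~".toList) = false := by
  have hn : c.toNat = 9 ∨ c.toNat = 10 ∨ c.toNat = 13 ∨ c.toNat = 32 := by
    simp [pvDomChar] at hd
    simp [PySem.Chars.isspace] at hs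
    omega
  have hc : c = '\t' ∨ c = '\n' ∨ c = '\r' ∨ c = ' ' := by
    rcases hn with h | h | h | h
    · left; exact Char.eq_of_val_eq (UInt32.toNat_inj.mp h)
    · right; left; exact Char.eq_of_val_eq (UInt32.toNat_inj.mp h)
    · right; right; left; exact Char.eq_of_val_eq (UInt32.toNat_inj.mp h)
    · right; right; right; exact Char.eq_of_val_eq (UInt32.toNat_inj.mp h)
  rcases hc with h | h | h | h <;> subst h <;> decide

-- B's append loop is a filter of the stripped words
theorem foldl_strip (strip : List Char → List Char) (words : List (List Char)) :
    ∀ acc, words.foldl (fun ws w =>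
        if (strip w).isEmpty then ws else ws ++ [strip w]) acc
      = acc ++ (words.map strip).filter (fun w => !w.isEmpty) := by
  induction words with
  | nil => intro acc; simp
  | cons w words' ih =>
    intro acc
    rw [List.foldl_cons]
    by_cases h : (strip w).isEmpty
    · rw [if_pos h, ih, List.map_cons, List.filter_cons]
      simp [h]
    · rw [if_neg h, ih, List.map_cons, List.filter_cons]
      simp [h, Bool.not_eq_true] 

-- the per-line results agree
theorem line_eq (line : String) (hd : pvDomStr line = true) :
    (let punctuations : List Char := "!()-[]{};:'\"\\,<>/?@#$%^&*~".toList
     let l := line.toList.foldl (fun s c =>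
       if PySem.Chars.isIn [c] punctuations then PySem.Chars.replace s [c] [] else s) line.toList
     String.mk (PySem.Chars.join [' '] (PySem.Chars.split₀ l)))
    = (let punctuations : List Char := "!()-[]{};:'\"\\,<>/?@#$%^&*~".toList
       let kept := (PySem.Chars.split₀ line.toList).foldl (fun ws w =>
         let stripped := w.filter (fun ch => !PySem.Chars.isIn [ch] punctuations)
         if stripped.isEmpty then ws else ws ++ [stripped]) []
       String.mk (PySem.Chars.join [' '] kept)) := by
  simp only []
  set punct : List Char := "!()-[]{};:'\"\\,<>/?@#$%^&*~".toList with hpunct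
  set cs : List Char := line.toList with hcs
  have hdall : ∀ c ∈ cs, pvDomChar c = true := by
    intro c hcmem
    have := hd
    simp only [pvDomStr, List.all_eq_true] at this
    exact this c hcmem
  have hq : ∀ c ∈ cs, PySem.Chars.isspace c = true →
      (!PySem.Chars.isIn [c] punct) = true := by
    intro c hcmem hsp
    rw [hpunct, dom_space_not_punct c (hdall c hcmem) hsp]
    rfl
  -- A's replace loop = character filter
  have hA : cs.foldl (fun s c =>
      if PySem.Chars.isIn [c] punct then PySem.Chars.replace s [c] [] else s) cs
      = cs.filter (fun ch => !PySem.Chars.isIn [ch] punct) := by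
    have h1 : (fun (s : List Char) (c : Char) =>
        if PySem.Chars.isIn [c] punct then PySem.Chars.replace s [c] [] else s)
        = (fun s c => if PySem.Chars.isIn [c] punct then s.filter (· ≠ c) else s) := by
      funext s c
      by_cases h : PySem.Chars.isIn [c] punct <;> simp [h, replace_single_eq_filter]
    rw [h1, foldl_replace_filter]
    apply List.filter_congr
    intro x hx
    simp [hx]
  rw [hA, foldl_strip, List.nil_append, split₀_eq_pvW, split₀_eq_pvW]
  have hW := pvW_filter (fun ch => !PySem.Chars.isIn [ch] punct) cs hq []
  simp only [List.filter_nil] at hW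
  rw [hW, List.filter_map]

theorem foldl_append_map {α β : Type} (g : α → β) (l : List α) : ∀ acc,
    l.foldl (fun a x => a ++ [g x]) acc = acc ++ l.map g := by
  induction l with
  | nil => intro acc; simp
  | cons x l' ih => intro acc; simp [ih]

-- ===== VERDICT (by name: the statement is the Claim_ definition above) =====
theorem rem_punctuations_spec : Claim_equal_rem_punctuations := by
  intro text hdom
  unfold Spec_rem_punctuations rem_punctuations rem_punctuations_alt
  simp only [foldl_append_map, List.nil_append]
  apply List.map_congr_left
  intro line hline
  have hd : pvDomStr line = true := by
    simp [Dom_rem_punctuations, List.all_eq_true] at hdom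
    exact hdom line hline
  exact line_eq line hd
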